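-- pv_equiv track=rewrite | github.com/OI-wiki/OI-wiki | docs/math/code/continued-fraction/recover-fraction.py | mod_min
-- ===== SOURCE A (Python) =====
-- def fraction(p, q):
--     a = []
--     while q:
--         a.append(p // q)
--         p, q = q, p % q
--     return a
--
-- def convergents(a):
--     p = [0, 1]
--     q = [1, 0]
--     for it in a:
--         p.append(p[-1] * it + p[-2])
--         q.append(q[-1] * it + q[-2])
--     return p, q
--
-- def mod_min(r, n, m):
--     a = fraction(r, m)
--     p, q = convergents(a)
--     for i in range(2, len(q)):
--         if i % 2 == 1 and (i + 1 == len(q) or q[i + 1] > n):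
--             t = (n - q[i - 1]) // q[i]
--             return q[i - 1] + t * q[i]
--     return 0
-- ===== SOURCE B (Python) =====
-- def mod_min(r, n, m):
--     # Fused single pass: Euclidean descent on (r, m) maintaining only the last
--     # two convergent denominators and the step index; no term list, no tables.
--     p, q = r, m
--     qq2, qq1 = 1, 0  # q[i-2], q[i-1]
--     i = 2
--     while q:
--         term = p // q
--         p, q = q, p % q
--         qc = qq1 * term + qq2  # q[i]
--         if i % 2 == 1 and (q == 0 or qc * (p // q) + qq1 > n):
--             t = (n - qq1) // qc
--             return qq1 + t * qc
--         qq2, qq1 = qq1, qc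
--         i += 1
--     return 0
-- ===== Notes on version B (the rewrite author's own statement) =====
-- stated objective: alternative
-- what changed: A builds the full continued-fraction term list and both complete p/q convergent tables and then scans the q table by index; B fuses everything into a single Euclidean loop that keeps only the last two denominators and a one-step quotient lookahead, dropping the numerator table entirely (O(1) extra space instead of O(log m)-sized lists).
import Mathlib
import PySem

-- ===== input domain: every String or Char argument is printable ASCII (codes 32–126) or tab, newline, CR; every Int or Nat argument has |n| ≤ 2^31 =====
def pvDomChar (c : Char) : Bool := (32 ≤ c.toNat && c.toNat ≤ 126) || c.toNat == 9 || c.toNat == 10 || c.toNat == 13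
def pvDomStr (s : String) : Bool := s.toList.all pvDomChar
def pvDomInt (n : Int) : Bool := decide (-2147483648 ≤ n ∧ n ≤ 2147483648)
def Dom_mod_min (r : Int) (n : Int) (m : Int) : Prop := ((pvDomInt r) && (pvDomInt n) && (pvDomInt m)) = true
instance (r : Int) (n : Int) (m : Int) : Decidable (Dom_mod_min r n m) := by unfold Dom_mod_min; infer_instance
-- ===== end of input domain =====

-- B fuses A's three stages (term list, full p/q convergent tables, index scan) into one
-- Euclidean loop keeping only the last two denominators — same return value, no intermediate lists.

-- ===== PORT A =====

-- termination helper for the Euclidean loop (|p % q| < |q| for q ≠ 0, Python semantics)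
theorem pvModNatAbsLt (p q : Int) (hq : q ≠ 0) :
    (PySem.Int.mod p q).natAbs < q.natAbs := by
  rcases lt_or_gt_of_ne hq with h | h
  · have := PySem.Int.mod_neg_bounds p h
    omega
  · have h1 := PySem.Int.mod_lt p h
    have h2 := PySem.Int.mod_nonneg p h
    omega

-- a = []; while q: a.append(p // q); p, q = q, p % q
def pyFraction (p q : Int) : List Int :=
  if hq : q = 0 then []
  else PySem.Int.floordiv p q :: pyFraction q (PySem.Int.mod p q)
termination_by q.natAbs
decreasing_by exact pvModNatAbsLt p q hq

-- one iteration of convergents' for-loop: append p[-1]*it+p[-2] and q[-1]*it+q[-2]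
-- (p[-1] etc. rendered as pyGet? … |>.getD 0; the lists always have length ≥ 2, so pyGet? never fails)
def pyConvStep (pq : List Int × List Int) (it : Int) : List Int × List Int :=
  (pq.1 ++ [(PySem.List.pyGet? pq.1 (-1)).getD 0 * it + (PySem.List.pyGet? pq.1 (-2)).getD 0],
   pq.2 ++ [(PySem.List.pyGet? pq.2 (-1)).getD 0 * it + (PySem.List.pyGet? pq.2 (-2)).getD 0])

def pyConvergents (a : List Int) : List Int × List Int :=
  a.foldl pyConvStep ([0, 1], [1, 0])

-- for i in range(2, len(q)): if i%2==1 and (i+1==len(q) or q[i+1]>n): return q[i-1]+t*q[i]; return 0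
-- (indices i-1, i, i+1 are in range whenever read, so getD's default is never used)
def pyLoopA (q : List Int) (n : Int) (i : Nat) : Int :=
  if i < q.length then
    if i % 2 = 1 ∧ (i + 1 = q.length ∨ q.getD (i + 1) 0 > n) then
      let t := PySem.Int.floordiv (n - q.getD (i - 1) 0) (q.getD i 0)
      q.getD (i - 1) 0 + t * q.getD i 0
    else pyLoopA q n (i + 1)
  else 0
termination_by q.length - i

def mod_min (r : Int) (n : Int) (m : Int) : Int :=
  let a := pyFraction r m
  let pq := pyConvergents a
  pyLoopA pq.2 n 2

-- ===== PORT B =====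

-- while q: term = p//q; p,q = q,p%q; qc = qq1*term+qq2;
--   if i%2==1 and (q==0 or qc*(p//q)+qq1 > n): return qq1 + ((n-qq1)//qc)*qc
--   qq2,qq1 = qq1,qc; i += 1
-- return 0
def pyBLoop (p q qq2 qq1 : Int) (i : Nat) (n : Int) : Int :=
  if hq : q = 0 then 0
  else
    let term := PySem.Int.floordiv p q
    let p' := q
    let q' := PySem.Int.mod p q
    let qc := qq1 * term + qq2
    if i % 2 = 1 ∧ (q' = 0 ∨ qc * PySem.Int.floordiv p' q' + qq1 > n) then
      qq1 + PySem.Int.floordiv (n - qq1) qc * qc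
    else pyBLoop p' q' qq1 qc (i + 1) n
termination_by q.natAbs
decreasing_by exact pvModNatAbsLt p q hq

def mod_min_alt (r : Int) (n : Int) (m : Int) : Int :=
  pyBLoop r m 1 0 2 n

-- ===== PRECONDITION & SPEC =====
def Spec_mod_min (r : Int) (n : Int) (m : Int) (out : Int) : Prop := out = mod_min_alt r n m
instance (r : Int) (n : Int) (m : Int) (out : Int) : Decidable (Spec_mod_min r n m out) := by unfold Spec_mod_min; infer_instance

-- ===== CLAIM (what is proved, stated in full; the proofs are below) =====
def Claim_equal_mod_min : Prop := ∀ (r : Int) (n : Int) (m : Int), Dom_mod_min r n m → Spec_mod_min r n m (mod_min r n m)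

-- ===== LEMMAS AND PROOFS =====

-- the scan both programs perform, expressed over the term list
def pvScan : List Int → Int → Int → Nat → Int → Int
  | [], _, _, _, _ => 0
  | t :: rest, qq2, qq1, i, n =>
    let qc := qq1 * t + qq2
    if i % 2 = 1 ∧ (rest = [] ∨ qc * rest.headD 0 + qq1 > n) then
      qq1 + PySem.Int.floordiv (n - qq1) qc * qc
    else pvScan rest qq1 qc (i + 1) n

theorem pyFraction_eq_nil_iff (p q : Int) : pyFraction p q = [] ↔ q = 0 := by
  rw [pyFraction]
  split_ifs with h <;> simp [h]

-- B's fused loop computes the scan of the term list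
theorem pyBLoop_eq_scan (k : Nat) (p q qq2 qq1 : Int) (i : Nat) (n : Int)
    (hk : q.natAbs ≤ k) :
    pyBLoop p q qq2 qq1 i n = pvScan (pyFraction p q) qq2 qq1 i n := by
  induction k generalizing p q qq2 qq1 i with
  | zero =>
    have hq : q = 0 := by omega
    rw [pyBLoop, pyFraction]
    simp [hq, pvScan]
  | succ k ih =>
    by_cases hq : q = 0
    · rw [pyBLoop, pyFraction]; simp [hq, pvScan]
    · rw [pyBLoop, pyFraction]
      simp only [hq, dite_false]
      rw [pvScan]
      have hrec : (PySem.Int.mod p q).natAbs ≤ k := by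
        have := pvModNatAbsLt p q hq; omega
      by_cases hr : PySem.Int.mod p q = 0
      · -- last term: both "or"-conditions reduce to i % 2 = 1
        have hnil : pyFraction q (PySem.Int.mod p q) = [] := by
          rw [pyFraction_eq_nil_iff]; exact hr
        rw [hnil]
        by_cases hi : i % 2 = 1
        · simp [hi, hr]
        · simp only [hi, false_and, if_false]
          rw [ih q (PySem.Int.mod p q) qq1 _ (i + 1) hrec, hnil]
      · -- more terms: head of the rest is the next quotient q // (p % q)
        have hcons : pyFraction q (PySem.Int.mod p q)
            = PySem.Int.floordiv q (PySem.Int.mod p q)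
              :: pyFraction (PySem.Int.mod p q) (PySem.Int.mod q (PySem.Int.mod p q)) := by
          rw [pyFraction]; simp [hr]
        rw [ih q (PySem.Int.mod p q) qq1 _ (i + 1) hrec]
        rw [hcons]
        simp [hr]

-- the q-side of one convergents iteration
def pvQStep (Q : List Int) (it : Int) : List Int :=
  Q ++ [(PySem.List.pyGet? Q (-1)).getD 0 * it + (PySem.List.pyGet? Q (-2)).getD 0]

theorem pyConv_snd (a : List Int) (P Q : List Int) :
    (a.foldl pyConvStep (P, Q)).2 = a.foldl pvQStep Q := by
  induction a generalizing P Q with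
  | nil => rfl
  | cons t rest ih => simp [List.foldl_cons, pyConvStep, pvQStep, ih]

theorem pyGet_neg_one (Q : List Int) (h : 1 ≤ Q.length) :
    (PySem.List.pyGet? Q (-1)).getD 0 = Q.getD (Q.length - 1) 0 := by
  have hidx : PySem.List.pyIdx? Q.length (-1) = some (Q.length - 1) := by
    unfold PySem.List.pyIdx?
    rw [if_neg (by norm_num), if_pos (by omega)]
    norm_num
  simp [PySem.List.pyGet?, hidx, List.getD]

theorem pyGet_neg_two (Q : List Int) (h : 2 ≤ Q.length) :
    (PySem.List.pyGet? Q (-2)).getD 0 = Q.getD (Q.length - 2) 0 := by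
  have hidx : PySem.List.pyIdx? Q.length (-2) = some (Q.length - 2) := by
    unfold PySem.List.pyIdx?
    rw [if_neg (by norm_num), if_pos (by omega)]
    norm_num
    rfl
  simp [PySem.List.pyGet?, hidx, List.getD]

theorem getD_last (Q : List Int) (x : Int) : (Q ++ [x]).getD Q.length 0 = x := by
  simp [List.getD]

theorem fold_qstep_length (a Q : List Int) :
    (a.foldl pvQStep Q).length = Q.length + a.length := by
  induction a generalizing Q with
  | nil => simp
  | cons t rest ih => simp [pvQStep, ih]; omega

theorem fold_qstep_getD (a Q : List Int) (j : Nat) (hj : j < Q.length) :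
    (a.foldl pvQStep Q).getD j 0 = Q.getD j 0 := by
  induction a generalizing Q with
  | nil => rfl
  | cons t rest ih =>
    rw [List.foldl_cons, ih (pvQStep Q t) (by simp [pvQStep]; omega)]
    exact List.getD_append _ _ _ _ hj

-- A's indexed pass over the full table is the same scan
theorem pyLoopA_eq_scan (a Q : List Int) (n : Int) (hQ : 2 ≤ Q.length) :
    pyLoopA (a.foldl pvQStep Q) n Q.length
      = pvScan a (Q.getD (Q.length - 2) 0) (Q.getD (Q.length - 1) 0) Q.length n := by
  induction a generalizing Q with
  | nil =>
    rw [pyLoopA]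
    simp [pvScan]
  | cons t rest ih =>
    set qq2 := Q.getD (Q.length - 2) 0 with hqq2
    set qq1 := Q.getD (Q.length - 1) 0 with hqq1
    have hstep : pvQStep Q t = Q ++ [qq1 * t + qq2] := by
      rw [pvQStep, pyGet_neg_one Q (by omega), pyGet_neg_two Q hQ]
    set x := qq1 * t + qq2 with hx
    have hlen : ((t :: rest).foldl pvQStep Q).length = Q.length + 1 + rest.length := by
      rw [fold_qstep_length]; simp; omega
    have hprefix : ∀ j, j < Q.length + 1 →
        ((t :: rest).foldl pvQStep Q).getD j 0 = (Q ++ [x]).getD j 0 := by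
      intro j hj
      rw [List.foldl_cons, hstep]
      exact fold_qstep_getD rest (Q ++ [x]) j (by simp; omega)
    have hgm1 : ((t :: rest).foldl pvQStep Q).getD (Q.length - 1) 0 = qq1 := by
      rw [hprefix _ (by omega), List.getD_append _ _ _ _ (by omega)]
    have hgi : ((t :: rest).foldl pvQStep Q).getD Q.length 0 = x := by
      rw [hprefix _ (by omega)]
      exact getD_last Q x
    rw [pyLoopA]
    have hlt : Q.length < ((t :: rest).foldl pvQStep Q).length := by omega
    rw [if_pos hlt]
    rw [pvScan]
    by_cases hi : Q.length % 2 = 1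
    · cases rest with
      | nil =>
        have hend : Q.length + 1 = ([t].foldl pvQStep Q).length := by
          rw [fold_qstep_length]; simp
        rw [if_pos ⟨hi, Or.inl hend⟩, if_pos ⟨hi, Or.inl rfl⟩, hgm1, hgi]
      | cons t' r2 =>
        have hne : ¬ (Q.length + 1 = ((t :: t' :: r2).foldl pvQStep Q).length) := by
          simp at hlen ⊢; omega
        have hg2 : ((t :: t' :: r2).foldl pvQStep Q).getD (Q.length + 1) 0
            = x * t' + qq1 := by
          rw [List.foldl_cons, hstep, List.foldl_cons]
          have g1 : (PySem.List.pyGet? (Q ++ [x]) (-1)).getD 0 = x := by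
            rw [pyGet_neg_one _ (by simp)]
            rw [show (Q ++ [x]).length - 1 = Q.length by simp]
            exact getD_last Q x
          have g2 : (PySem.List.pyGet? (Q ++ [x]) (-2)).getD 0 = qq1 := by
            rw [pyGet_neg_two _ (by simp; omega)]
            rw [show (Q ++ [x]).length - 2 = Q.length - 1 by simp]
            exact List.getD_append _ _ _ _ (by omega)
          have hstep2 : pvQStep (Q ++ [x]) t' = Q ++ [x] ++ [x * t' + qq1] := by
            rw [pvQStep, g1, g2]
          rw [hstep2]
          rw [fold_qstep_getD r2 _ (Q.length + 1) (by simp)]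
          rw [show Q.length + 1 = (Q ++ [x]).length by simp]
          exact getD_last _ _
        by_cases hc : x * t' + qq1 > n
        · rw [if_pos ⟨hi, Or.inr (by rw [hg2]; exact hc)⟩,
              if_pos ⟨hi, Or.inr (by simpa using hc)⟩, hgm1, hgi]
        · rw [if_neg (by
            intro hAnd
            rcases hAnd.2 with h | h
            · exact hne h
            · rw [hg2] at h; exact hc h)]
          rw [if_neg (by
            intro hAnd
            rcases hAnd.2 with h | h
            · exact List.cons_ne_nil _ _ h
            · simp at h; exact hc h)]
          have ihx := ih (Q ++ [x]) (by simp; omega)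
          rw [List.foldl_cons, hstep]
          have e1 : (Q ++ [x]).length = Q.length + 1 := by simp
          rw [e1] at ihx
          have e2 : (Q ++ [x]).getD (Q.length + 1 - 2) 0 = qq1 := by
            have h12 : Q.length + 1 - 2 = Q.length - 1 := by omega
            rw [h12, List.getD_append _ _ _ _ (by omega)]
          have e3 : (Q ++ [x]).getD (Q.length + 1 - 1) 0 = x := getD_last Q x
          rw [e2, e3] at ihx
          exact ihx
    · rw [if_neg (fun hAnd => hi hAnd.1)]
      rw [if_neg (fun hAnd => hi hAnd.1)]
      have ihx := ih (Q ++ [x]) (by simp; omega)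
      rw [List.foldl_cons, hstep]
      have e1 : (Q ++ [x]).length = Q.length + 1 := by simp
      rw [e1] at ihx
      have e2 : (Q ++ [x]).getD (Q.length + 1 - 2) 0 = qq1 := by
        have h12 : Q.length + 1 - 2 = Q.length - 1 := by omega
        rw [h12, List.getD_append _ _ _ _ (by omega)]
      have e3 : (Q ++ [x]).getD (Q.length + 1 - 1) 0 = x := getD_last Q x
      rw [e2, e3] at ihx
      exact ihx

-- ===== VERDICT (by name: the statement is the Claim_ definition above) =====
theorem mod_min_spec : Claim_equal_mod_min := by
  intro r n m _
  unfold Spec_mod_min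
  show pyLoopA (pyConvergents (pyFraction r m)).2 n 2 = pyBLoop r m 1 0 2 n
  have hA := pyLoopA_eq_scan (pyFraction r m) [1, 0] n (by simp)
  have hB := pyBLoop_eq_scan m.natAbs r m 1 0 2 n le_rfl
  simp only [List.length_cons, List.length_nil] at hA
  rw [show (pyConvergents (pyFraction r m)).2
        = (pyFraction r m).foldl pvQStep [1, 0] from pyConv_snd _ _ _]
  rw [hA, hB]
  rfl
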